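-- pv_equiv track=rewrite | github.com/nickleali/cvss-mentor | startup/cvsscomparers.py | parse_cvss_vector
-- ===== SOURCE A (Python) =====
-- def parse_cvss_vector(vector_string):
--     """
--     Parses a CVSS v3.1 vector string into a dictionary of metric-value pairs.
--     Example: "CVSS:3.1/AV:N/AC:L/PR:L/UI:R/S:C/C:L/I:L/A:N"
--     Returns: {'AV': 'N', 'AC': 'L', 'PR': 'L', 'UI': 'R', 'S': 'C', 'C': 'L', 'I': 'L', 'A': 'N'}
--     """
--     metrics = {}
--     if not vector_string or not vector_string.startswith("CVSS:3.1/"):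
--         return metrics
--
--     parts = vector_string.split('/')[1:] # Skip "CVSS:3.1"
--     for part in parts:
--         if ':' in part:
--             key, value = part.split(':', 1)
--             metrics[key] = value
--     return metrics
-- ===== SOURCE B (Python) =====
-- def parse_cvss_vector(vector_string):
--     """Single left-to-right character scan with a key/value state machine
--     instead of split('/') + split(':', 1)."""
--     metrics = {}
--     if not vector_string or not vector_string.startswith("CVSS:3.1/"):
--         return metrics
--     key = None   # None while still reading a key; else the finished key
--     buf = []
--     for ch in vector_string[9:]:
--         if ch == '/':
--             if key is not None:
--                 metrics[key] = ''.join(buf)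
--             key = None
--             buf = []
--         elif ch == ':' and key is None:
--             key = ''.join(buf)
--             buf = []
--         else:
--             buf.append(ch)
--     if key is not None:
--         metrics[key] = ''.join(buf)
--     return metrics
-- ===== Notes on version B (the rewrite author's own statement) =====
-- stated objective: alternative
-- what changed: Replaces the split-on-slash loop with its per-part colon split by a single left-to-right character scan over the string after the 9-character header, driven by a key/value state machine (the first colon of a segment ends the key, a slash flushes the pair), building the dict in one pass with no intermediate part lists.
import Mathlib
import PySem

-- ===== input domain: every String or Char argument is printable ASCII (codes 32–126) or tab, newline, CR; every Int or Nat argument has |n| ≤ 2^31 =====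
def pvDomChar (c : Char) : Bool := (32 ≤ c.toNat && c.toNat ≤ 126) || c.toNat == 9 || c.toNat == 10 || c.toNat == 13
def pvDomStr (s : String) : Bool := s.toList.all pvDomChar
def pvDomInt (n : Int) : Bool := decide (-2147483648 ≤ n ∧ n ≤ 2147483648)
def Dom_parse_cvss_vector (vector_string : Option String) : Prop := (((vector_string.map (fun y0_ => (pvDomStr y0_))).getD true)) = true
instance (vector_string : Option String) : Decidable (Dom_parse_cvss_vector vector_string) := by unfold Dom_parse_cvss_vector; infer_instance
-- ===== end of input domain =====

-- B replaces A's split('/') + per-part split(':', 1) by a single left-to-right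
-- character scan with a key/value state machine (objective: alternative, same cost).

-- ===== PORT A =====
-- Python's `key, value = part.split(':', 1)` always yields exactly two pieces when
-- ':' in part; kv.headI / kv.tail.headI are those two pieces. split with the
-- literal non-empty separators never raises, so `.getD []` is exact.
def parse_cvss_vector (vector_string : Option String) : List (String × String) :=
  match vector_string with
  | none => (PySem.Dict.empty : PySem.Dict String String).items
  | some s =>
    if s = "" || !(PySem.Str.startswith s "CVSS:3.1/") then
      (PySem.Dict.empty : PySem.Dict String String).items
    else
      let parts := ((PySem.Str.split? s "/").getD []).drop 1
      (parts.foldl (fun (m : PySem.Dict String String) part =>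
          if PySem.Str.isIn ":" part then
            let kv := (PySem.Str.splitMax? part ":" 1).getD []
            m.insert kv.headI kv.tail.headI
          else m) PySem.Dict.empty).items

-- ===== PORT B =====
-- `if key is not None: metrics[key] = ''.join(buf)`
def altFlush (m : PySem.Dict String String) (key? : Option (List Char)) (buf : List Char) :
    PySem.Dict String String :=
  match key? with
  | some k => m.insert (String.ofList k) (String.ofList buf)
  | none => m

-- the `for ch in vector_string[9:]` loop of Source B, plus the final flush
def altLoop (cs : List Char) (key? : Option (List Char)) (buf : List Char)
    (m : PySem.Dict String String) : PySem.Dict String String :=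
  match cs with
  | [] => altFlush m key? buf
  | c :: rest =>
    if c = '/' then altLoop rest none [] (altFlush m key? buf)
    else if c = ':' ∧ key? = none then altLoop rest (some buf) [] m
    else altLoop rest key? (buf ++ [c]) m

def parse_cvss_vector_alt (vector_string : Option String) : List (String × String) :=
  match vector_string with
  | none => (PySem.Dict.empty : PySem.Dict String String).items
  | some s =>
    if s = "" || !(PySem.Str.startswith s "CVSS:3.1/") then
      (PySem.Dict.empty : PySem.Dict String String).items
    else
      (altLoop (PySem.Str.slice s (some 9) none).toList none [] PySem.Dict.empty).items

-- ===== PRECONDITION & SPEC =====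
def Spec_parse_cvss_vector (vector_string : Option String) (out : List (String × String)) : Prop := out = parse_cvss_vector_alt vector_string
instance (vector_string : Option String) (out : List (String × String)) : Decidable (Spec_parse_cvss_vector vector_string out) := by unfold Spec_parse_cvss_vector; infer_instance

-- ===== CLAIM (what is proved, stated in full; the proofs are below) =====
def Claim_equal_parse_cvss_vector : Prop := ∀ (vector_string : Option String), Dom_parse_cvss_vector vector_string → Spec_parse_cvss_vector vector_string (parse_cvss_vector vector_string)

-- ===== LEMMAS AND PROOFS =====

-- proof-side model: structural '/'-split of a char list (Python split keeps empties)
def simpleSplit : List Char → List (List Char)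
  | [] => [[]]
  | c :: rest =>
    if c = '/' then [] :: simpleSplit rest
    else (simpleSplit rest).modifyHead (fun seg => c :: seg)

-- proof-side model of A's per-part step, on char lists
def stepA (m : PySem.Dict String String) (part : List Char) : PySem.Dict String String :=
  if ':' ∈ part then
    m.insert (String.ofList (part.takeWhile (· ≠ ':'))) (String.ofList ((part.dropWhile (· ≠ ':')).tail))
  else m

lemma modifyHead_nil_append (l : List (List Char)) : l.modifyHead (fun x => [] ++ x) = l := by
  cases l <;> simp

lemma simpleSplit_ne_nil : ∀ (cs : List Char), simpleSplit cs ≠ []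
  | [] => by simp [simpleSplit]
  | c :: rest => by
    simp only [simpleSplit]
    split
    · simp
    · cases h : simpleSplit rest with
      | nil => exact absurd h (simpleSplit_ne_nil rest)
      | cons a b => simp

lemma splitOn_go_eq (fuel : Nat) : ∀ (l cur : List Char) (acc : List (List Char)),
    l.length < fuel →
    PySem.Chars.splitOn.go ['/'] fuel l cur acc
      = acc.reverse ++ (simpleSplit l).modifyHead (fun seg => cur.reverse ++ seg) := by
  induction fuel with
  | zero => intro l cur acc h; omega
  | succ f ih =>
    intro l cur acc h
    cases l with
    | nil => simp [PySem.Chars.splitOn.go, simpleSplit]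
    | cons c rest =>
      rw [PySem.Chars.splitOn.go]
      by_cases hc : c = '/'
      · subst hc
        have hpre : List.isPrefixOf ['/'] ('/' :: rest) = true := by simp [List.isPrefixOf]
        rw [if_pos hpre]
        simp only [List.length_cons] at h
        rw [ih _ _ _ (by simpa using Nat.lt_of_succ_lt_succ h)]
        simp [simpleSplit, List.modifyHead]
        cases hs : simpleSplit rest <;> simp
      · have hpre : List.isPrefixOf ['/'] (c :: rest) = false := by
          simp [List.isPrefixOf]; exact fun h => absurd h.symm hc
        rw [if_neg (by simp [hpre])]
        simp only [List.length_cons] at h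
        rw [ih _ _ _ (Nat.lt_of_succ_lt_succ h)]
        simp only [simpleSplit, if_neg hc]
        cases hs : simpleSplit rest <;> simp [List.modifyHead]

lemma splitOn_eq_simpleSplit (cs : List Char) :
    PySem.Chars.splitOn cs ['/'] = simpleSplit cs := by
  rw [PySem.Chars.splitOn, splitOn_go_eq _ _ _ _ (by omega)]
  simpa using modifyHead_nil_append _

lemma splitOnMax_go0 (fuel : Nat) : ∀ (l : List Char) (acc : List (List Char)),
    l.length < fuel →
    PySem.Chars.splitOnMax.go [':'] fuel 0 l [] acc = acc.reverse ++ [l] := by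
  induction fuel with
  | zero => intro l acc h; omega
  | succ f ih =>
    intro l acc h
    cases l with
    | nil => simp [PySem.Chars.splitOnMax.go]
    | cons c rest => rw [PySem.Chars.splitOnMax.go]; simp

lemma splitOnMax_go_eq (fuel : Nat) : ∀ (l cur : List Char) (acc : List (List Char)),
    l.length < fuel →
    PySem.Chars.splitOnMax.go [':'] fuel 1 l cur acc
      = acc.reverse ++ (if ':' ∈ l then
          [cur.reverse ++ l.takeWhile (· ≠ ':'), (l.dropWhile (· ≠ ':')).tail]
        else [cur.reverse ++ l]) := by
  induction fuel with
  | zero => intro l cur acc h; omega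
  | succ f ih =>
    intro l cur acc h
    cases l with
    | nil => simp [PySem.Chars.splitOnMax.go]
    | cons c rest =>
      rw [PySem.Chars.splitOnMax.go]
      simp only [List.length_cons] at h
      by_cases hc : c = ':'
      · subst hc
        have hpre : List.isPrefixOf [':'] (':' :: rest) = true := by simp [List.isPrefixOf]
        rw [if_neg (by omega), if_pos hpre]
        have h11 : (1:ℕ) - 1 = 0 := rfl
        simp only [h11, List.length_cons, List.length_nil, List.drop_succ_cons, List.drop_zero]
        rw [splitOnMax_go0 f rest _ (Nat.lt_of_succ_lt_succ h)]
        simp [List.takeWhile, List.dropWhile]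
      · have hpre : List.isPrefixOf [':'] (c :: rest) = false := by
          simp [List.isPrefixOf]; exact fun h => absurd h.symm hc
        rw [if_neg (by omega), if_neg (by simp [hpre])]
        rw [ih _ _ _ (Nat.lt_of_succ_lt_succ h)]
        by_cases hm : ':' ∈ rest
        · simp [hm, hc, Ne.symm hc, List.takeWhile, List.dropWhile]
        · simp [hm, Ne.symm hc]

lemma splitOnMax_one (cs : List Char) :
    PySem.Chars.splitOnMax cs [':'] 1
      = (if ':' ∈ cs then [cs.takeWhile (· ≠ ':'), (cs.dropWhile (· ≠ ':')).tail]
         else [cs]) := by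
  rw [PySem.Chars.splitOnMax, if_neg (by omega)]
  have h1 : Int.toNat 1 = 1 := rfl
  rw [h1, splitOnMax_go_eq _ _ _ _ (by omega)]
  simp

lemma singleton_infix_iff (a : Char) (l : List Char) : [a] <:+: l ↔ a ∈ l := by
  constructor
  · rintro ⟨s, t, rfl⟩; simp
  · intro h
    obtain ⟨s, t, rfl⟩ := List.append_of_mem h
    exact ⟨s, t, by simp⟩

lemma stepStr_eq (m : PySem.Dict String String) (part : String) :
    (if PySem.Str.isIn ":" part then
        let kv := (PySem.Str.splitMax? part ":" 1).getD []
        m.insert kv.headI kv.tail.headI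
      else m) = stepA m part.toList := by
  have hin : PySem.Str.isIn ":" part = PySem.Chars.isIn [':'] part.toList := by simp
  by_cases h : ':' ∈ part.toList
  · have ht : PySem.Chars.isIn [':'] part.toList = true :=
      (PySem.Chars.isIn_iff_infix _ _).2 ((singleton_infix_iff _ _).2 h)
    rw [hin, ht, if_pos rfl]
    have hmap := PySem.Str.splitMax?_map part ":" 1
    rw [show (":" : String).toList = [':'] from rfl, PySem.Chars.splitMax?] at hmap
    rw [if_neg (by simp), splitOnMax_one, if_pos h] at hmap
    cases hkv : PySem.Str.splitMax? part ":" 1 with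
    | none => rw [hkv] at hmap; simp at hmap
    | some l =>
      rw [hkv] at hmap
      simp only [Option.map_some, Option.some.injEq] at hmap
      cases l with
      | nil => simp at hmap
      | cons s1 l' =>
        cases l' with
        | nil => simp at hmap
        | cons s2 l'' =>
          cases l'' with
          | cons s3 l3 => simp at hmap
          | nil =>
            simp only [List.map_cons, List.map_nil, List.cons.injEq, and_true] at hmap
            obtain ⟨h1, h2⟩ := hmap
            simp only [Option.getD_some, List.headI, List.tail_cons, stepA, if_pos h]
            rw [← h1, ← h2, String.ofList_toList, String.ofList_toList]
  · have hf : PySem.Chars.isIn [':'] part.toList = false := by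
      rw [← Bool.not_eq_true, PySem.Chars.isIn_iff_infix, singleton_infix_iff]; exact h
    rw [hin, hf, if_neg (by simp), stepA, if_neg h]

lemma stepA_no_colon (m : PySem.Dict String String) (buf : List Char) (h : ':' ∉ buf) :
    stepA m buf = m := by
  rw [stepA, if_neg h]

lemma takeWhile_buf_colon (buf : List Char) (h : ':' ∉ buf) (s0 : List Char) :
    List.takeWhile (fun x => decide (x ≠ ':')) (buf ++ ':' :: s0) = buf := by
  induction buf with
  | nil => simp
  | cons a t iht =>
    simp only [List.mem_cons, not_or] at h
    simp only [List.cons_append, List.takeWhile_cons]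
    rw [if_pos (by simpa using fun e => h.1 e.symm), iht h.2]

lemma dropWhile_buf_colon (buf : List Char) (h : ':' ∉ buf) (s0 : List Char) :
    List.dropWhile (fun x => decide (x ≠ ':')) (buf ++ ':' :: s0) = ':' :: s0 := by
  induction buf with
  | nil => simp
  | cons a t iht =>
    simp only [List.mem_cons, not_or] at h
    simp only [List.cons_append, List.dropWhile_cons]
    rw [if_pos (by simpa using fun e => h.1 e.symm), iht h.2]

lemma stepA_key (m : PySem.Dict String String) (buf s0 : List Char) (h : ':' ∉ buf) :
    stepA m (buf ++ ':' :: s0) = m.insert (String.ofList buf) (String.ofList s0) := by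
  rw [stepA, if_pos (by simp), takeWhile_buf_colon buf h s0, dropWhile_buf_colon buf h s0,
    List.tail_cons]

lemma altLoop_spec : ∀ (cs buf : List Char) (m : PySem.Dict String String),
    (':' ∉ buf →
      altLoop cs none buf m = ((simpleSplit cs).modifyHead (fun seg => buf ++ seg)).foldl stepA m)
    ∧ ∀ k, altLoop cs (some k) buf m
        = (simpleSplit cs).tail.foldl stepA
            (m.insert (String.ofList k) (String.ofList (buf ++ (simpleSplit cs).headI))) := by
  intro cs
  induction cs with
  | nil =>
    intro buf m
    constructor
    · intro hbuf
      simp [altLoop, altFlush, simpleSplit, stepA_no_colon m buf hbuf]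
    · intro k; simp [altLoop, altFlush, simpleSplit]
  | cons c rest ih =>
    intro buf m
    obtain ⟨s0, segs, hsp⟩ := List.exists_cons_of_ne_nil (simpleSplit_ne_nil rest)
    constructor
    · intro hbuf
      by_cases hc : c = '/'
      · subst hc
        rw [altLoop, if_pos rfl]
        have h1 := ((ih [] (altFlush m none buf)).1 (by simp))
        rw [h1, modifyHead_nil_append]
        simp [simpleSplit, List.modifyHead, altFlush, stepA_no_colon m buf hbuf]
      · by_cases hcol : c = ':'
        · subst hcol
          rw [altLoop, if_neg hc, if_pos ⟨rfl, rfl⟩]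
          rw [(ih [] m).2 buf, hsp]
          simp only [List.tail_cons, List.headI, List.nil_append]
          rw [simpleSplit, if_neg hc, hsp]
          simp only [List.modifyHead, List.foldl_cons]
          rw [stepA_key m buf s0 hbuf]
        · rw [altLoop, if_neg hc, if_neg (by simp [hcol]),
            (ih (buf ++ [c]) m).1 (by simp [hbuf]; exact fun e => hcol e.symm)]
          rw [simpleSplit, if_neg hc, hsp]
          simp [List.modifyHead]
    · intro k
      by_cases hc : c = '/'
      · subst hc
        rw [altLoop, if_pos rfl]
        have h1 := ((ih [] (altFlush m (some k) buf)).1 (by simp))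
        rw [h1, modifyHead_nil_append]
        simp [simpleSplit, altFlush]
      · rw [altLoop, if_neg hc, if_neg (by simp), (ih (buf ++ [c]) m).2 k]
        rw [simpleSplit, if_neg hc, hsp]
        simp [List.modifyHead]

lemma simpleSplit_header (t : List Char) :
    simpleSplit ("CVSS:3.1/".toList ++ t) = "CVSS:3.1".toList :: simpleSplit t := by
  have h : "CVSS:3.1/".toList = ['C','V','S','S',':','3','.','1','/'] := rfl
  rw [h]
  simp [simpleSplit, List.modifyHead]

-- ===== VERDICT (by name: the statement is the Claim_ definition above) =====
theorem parse_cvss_vector_spec : Claim_equal_parse_cvss_vector := by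
  intro v _
  unfold Spec_parse_cvss_vector
  cases v with
  | none => rfl
  | some s =>
    simp only [parse_cvss_vector, parse_cvss_vector_alt]
    split_ifs with hcond
    · rfl
    · -- the guard is false: s is nonempty and starts with the header
      have hsw : PySem.Str.startswith s "CVSS:3.1/" = true := by
        cases hb : PySem.Str.startswith s "CVSS:3.1/"
        · exact absurd (by rw [hb]; simp) hcond
        · rfl
      rw [PySem.Str.startswith_eq] at hsw
      obtain ⟨t, ht⟩ := (PySem.Chars.startswith_iff _ _).1 hsw
      have ht' : s.toList = "CVSS:3.1/".toList ++ t := ht.symm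
      -- A side: relate split? to simpleSplit
      have hsp : Option.map (fun x => List.map String.toList x) (PySem.Str.split? s "/")
          = some (simpleSplit s.toList) := by
        rw [PySem.Str.split?_map, PySem.Chars.split?]
        rw [if_neg (by simp)]
        rw [show ("/" : String).toList = ['/'] from rfl, splitOn_eq_simpleSplit]
      cases hq : PySem.Str.split? s "/" with
      | none => rw [hq] at hsp; simp at hsp
      | some l =>
        rw [hq] at hsp
        simp only [Option.map_some, Option.some.injEq] at hsp
        simp only [Option.getD_some]
        -- rewrite A's fold step into stepA over char lists
        have hfold : (l.drop 1).foldl (fun (m : PySem.Dict String String) part =>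
              if PySem.Str.isIn ":" part then
                let kv := (PySem.Str.splitMax? part ":" 1).getD []
                m.insert kv.headI kv.tail.headI
              else m) PySem.Dict.empty
            = ((l.drop 1).map String.toList).foldl stepA PySem.Dict.empty := by
          rw [List.foldl_map]
          exact PySem.List.foldl_congr_mem _ _ _ _ (fun acc x _ => stepStr_eq acc x)
        rw [hfold]
        have hdrop : (l.drop 1).map String.toList = simpleSplit t := by
          rw [List.map_drop, hsp, ht', simpleSplit_header]
          simp
        rw [hdrop]
        -- B side
        have hslice : (PySem.Str.slice s (some 9) none).toList = t := by
          rw [PySem.Str.toList_slice]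
          simp only [PySem.Chars.slice_eq_listSlice]
          rw [PySem.List.slice_from _ (by omega), ht']
          rfl
        rw [hslice, (altLoop_spec t [] PySem.Dict.empty).1 (by simp), modifyHead_nil_append]
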